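-- pv_equiv track=rewrite | github.com/traden-ai/traden.ai | DataProvider/database_handler/utils.py | get_start_and_end_date
-- ===== SOURCE A (Python) =====
-- def get_start_and_end_date(items):
--     start_date = {}
--     end_date = {}
--     for ticker in items:
--         if ticker not in start_date:
--             start_date[ticker] = {}
--         if ticker not in end_date:
--             end_date[ticker] = {}
--             for date in items[ticker]:
--                 current_date = date
--                 for indicator in items[ticker][date]:
--                     if indicator not in start_date[ticker]:
--                         start_date[ticker][indicator] = current_date
--                     if indicator not in end_date[ticker]:
--                         end_date[ticker][indicator] = current_date
--                     if start_date[ticker][indicator] > current_date: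
--                         start_date[ticker][indicator] = current_date
--                     if end_date[ticker][indicator] < current_date:
--                         end_date[ticker][indicator] = current_date
--     return start_date, end_date
-- ===== SOURCE B (Python) =====
-- def get_start_and_end_date(items):
--     start_date = {}
--     end_date = {}
--     for ticker in items:
--         occ = {}
--         for date in items[ticker]:
--             for indicator in items[ticker][date]:
--                 occ.setdefault(indicator, []).append(date)
--         start_date[ticker] = {ind: min(ds) for ind, ds in occ.items()}
--         end_date[ticker] = {ind: max(ds) for ind, ds in occ.items()}
--     return start_date, end_date
-- ===== Notes on version B (the rewrite author's own statement) =====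
-- stated objective: simpler
-- what changed: A maintains running first-seen/min/max comparisons with four membership/compare branches on the nested result dicts; B first groups all dates per (ticker, indicator) into a helper index and then builds the two result dicts in one collect-then-reduce pass with min()/max(); Pre_ only excludes association lists with a repeated ticker key, which no Python dict input can represent.
import Mathlib
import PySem

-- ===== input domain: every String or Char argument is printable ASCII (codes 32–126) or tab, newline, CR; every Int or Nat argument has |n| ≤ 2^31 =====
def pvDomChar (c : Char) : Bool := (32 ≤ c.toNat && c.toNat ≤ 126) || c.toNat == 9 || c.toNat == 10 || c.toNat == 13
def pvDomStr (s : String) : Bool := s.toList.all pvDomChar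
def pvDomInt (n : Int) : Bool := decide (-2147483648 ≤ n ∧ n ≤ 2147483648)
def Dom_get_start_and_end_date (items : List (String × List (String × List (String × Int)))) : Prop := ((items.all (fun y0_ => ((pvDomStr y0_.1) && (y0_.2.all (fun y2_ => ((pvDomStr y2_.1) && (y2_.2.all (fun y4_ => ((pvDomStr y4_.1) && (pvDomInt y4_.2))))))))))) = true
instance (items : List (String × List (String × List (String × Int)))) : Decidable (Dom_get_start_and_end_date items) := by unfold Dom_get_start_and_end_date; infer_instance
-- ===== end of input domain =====

-- B replaces A's running first-seen/min/max dict updates by a collect-then-reduce decomposition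
-- (group all dates per (ticker, indicator), then take min/max); equivalence of RETURN values is proved.

-- ===== PORT A =====
-- `start_date[ticker][indicator] = v` on the nested dict: update of the outer dict at `ticker`
-- (the key is always present at this point, so the `getD` default is never used).
def pvSet (d : PySem.Dict String (PySem.Dict String String)) (t ind v : String) :
    PySem.Dict String (PySem.Dict String String) :=
  d.insert t ((d.getD t PySem.Dict.empty).insert ind v)

-- the body of A's innermost loop (one `indicator` of one `date` of ticker `t`)
def pvBodyA (t date ind : String)
    (st : PySem.Dict String (PySem.Dict String String) × PySem.Dict String (PySem.Dict String String)) :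
    PySem.Dict String (PySem.Dict String String) × PySem.Dict String (PySem.Dict String String) :=
  let sd := st.1
  let ed := st.2
  let sd := if (sd.getD t PySem.Dict.empty).contains ind then sd else pvSet sd t ind date
  let ed := if (ed.getD t PySem.Dict.empty).contains ind then ed else pvSet ed t ind date
  let sd := if date < (sd.getD t PySem.Dict.empty).getD ind "" then pvSet sd t ind date else sd
  let ed := if (ed.getD t PySem.Dict.empty).getD ind "" < date then pvSet ed t ind date else ed
  (sd, ed)

-- one iteration of A's outer loop (one ticker)
def pvStepA
    (st : PySem.Dict String (PySem.Dict String String) × PySem.Dict String (PySem.Dict String String))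
    (t : String) (td : List (String × List (String × Int))) :
    PySem.Dict String (PySem.Dict String String) × PySem.Dict String (PySem.Dict String String) :=
  let sd := if st.1.contains t then st.1 else st.1.insert t PySem.Dict.empty
  let ed := st.2
  if ed.contains t then (sd, ed)
  else
    td.foldl (fun st2 dp => dp.2.foldl (fun st3 ip => pvBodyA t dp.1 ip.1 st3) st2)
      (sd, ed.insert t PySem.Dict.empty)

def get_start_and_end_date (items : List (String × List (String × List (String × Int)))) :
    (List (String × List (String × String))) × (List (String × List (String × String))) :=
  let r := items.foldl (fun st p => pvStepA st p.1 p.2) (PySem.Dict.empty, PySem.Dict.empty)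
  (r.1.items.map (fun p => (p.1, p.2.items)), r.2.items.map (fun p => (p.1, p.2.items)))

-- ===== PORT B =====
-- occ: (indicator -> list of all dates at which it occurs), built with setdefault+append = modify
def pvOcc (td : List (String × List (String × Int))) : PySem.Dict String (List String) :=
  td.foldl (fun occ dp => dp.2.foldl (fun occ2 ip => occ2.modify ip.1 [] (· ++ [dp.1])) occ)
    PySem.Dict.empty

-- min(ds) / max(ds); in B `ds` is always nonempty, so the "" default is never used
def pvMin (ds : List String) : String := (PySem.List.min? ds (fun x => x)).getD ""
def pvMax (ds : List String) : String := (PySem.List.max? ds (fun x => x)).getD ""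

def get_start_and_end_date_alt (items : List (String × List (String × List (String × Int)))) :
    (List (String × List (String × String))) × (List (String × List (String × String))) :=
  let r := items.foldl (fun st p =>
      let occ := pvOcc p.2
      (st.1.insert p.1 (PySem.Dict.ofList ((occ.items).map (fun q => (q.1, pvMin q.2)))),
       st.2.insert p.1 (PySem.Dict.ofList ((occ.items).map (fun q => (q.1, pvMax q.2))))))
    (PySem.Dict.empty, PySem.Dict.empty)
  (r.1.items.map (fun p => (p.1, p.2.items)), r.2.items.map (fun p => (p.1, p.2.items)))

-- ===== PRECONDITION & SPEC =====
-- Pre_ excludes assoc lists with a repeated ticker key: no Python dict input has one (dict keys are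
-- unique), so this excludes nothing A's Python returns on; it only fixes the list-level corner.
def Pre_get_start_and_end_date (items : List (String × List (String × List (String × Int)))) : Prop :=
  (items.map Prod.fst).Nodup
instance (items : List (String × List (String × List (String × Int)))) : Decidable (Pre_get_start_and_end_date items) := by unfold Pre_get_start_and_end_date; infer_instance
def pvWitness_get_start_and_end_date : (List (String × List (String × List (String × Int)))) :=
  [("AAPL", [("2020-01-01", [("rsi", 1)]), ("2020-01-02", [("rsi", 2), ("ema", 3)])])]

def Spec_get_start_and_end_date (items : List (String × List (String × List (String × Int)))) (out : (List (String × List (String × String))) × (List (String × List (String × String)))) : Prop := out = get_start_and_end_date_alt items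
instance (items : List (String × List (String × List (String × Int)))) (out : (List (String × List (String × String))) × (List (String × List (String × String)))) : Decidable (Spec_get_start_and_end_date items out) := by unfold Spec_get_start_and_end_date; infer_instance

-- ===== CLAIM (what is proved, stated in full; the proofs are below) =====
def Claim_equal_get_start_and_end_date : Prop := ∀ (items : List (String × List (String × List (String × Int)))), Dom_get_start_and_end_date items → Pre_get_start_and_end_date items → Spec_get_start_and_end_date items (get_start_and_end_date items)

-- ===== LEMMAS AND PROOFS =====

-- the flattened (indicator, date) occurrence list of one ticker
def pvFlat (td : List (String × List (String × Int))) : List (String × String) :=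
  td.flatMap (fun dp => dp.2.map (fun ip => (ip.1, dp.1)))

-- the per-indicator value A's innermost body stores (first occurrence, then running min / max)
def pvNewS (s : PySem.Dict String String) (q : String × String) : String :=
  match s.get? q.1 with | none => q.2 | some c => min c q.2
def pvNewE (s : PySem.Dict String String) (q : String × String) : String :=
  match s.get? q.1 with | none => q.2 | some c => max c q.2

def pvFoldS (ps : List (String × String)) (s : PySem.Dict String String) : PySem.Dict String String :=
  ps.foldl (fun s q => s.insert q.1 (pvNewS s q)) s
def pvFoldE (ps : List (String × String)) (s : PySem.Dict String String) : PySem.Dict String String :=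
  ps.foldl (fun s q => s.insert q.1 (pvNewE s q)) s

def pvDates (ind : String) (ps : List (String × String)) : List String :=
  (ps.filter (fun q => q.1 == ind)).map (fun q => q.2)

def pvMStep (o : Option String) (d : String) : Option String :=
  some (match o with | none => d | some c => min c d)
def pvXStep (o : Option String) (d : String) : Option String :=
  some (match o with | none => d | some c => max c d)

-- a nested fold over dates/indicators is the fold over the flattened occurrence list
theorem pv_flat_fold {σ : Type} (g : σ → String → String → σ)
    (td : List (String × List (String × Int))) (s : σ) :
    td.foldl (fun a dp => dp.2.foldl (fun a2 ip => g a2 ip.1 dp.1) a) s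
      = (pvFlat td).foldl (fun a q => g a q.1 q.2) s := by
  induction td generalizing s with
  | nil => rfl
  | cons dp rest ih =>
    simp only [pvFlat, List.foldl_cons, List.flatMap_cons, List.foldl_append, List.foldl_map]
    exact ih _

theorem pv_mfold_some (l : List String) (c : String) :
    l.foldl pvMStep (some c) = some (l.foldl min c) := by
  induction l generalizing c with
  | nil => rfl
  | cons d t ih => simp only [List.foldl_cons, pvMStep]; exact ih _

theorem pv_xfold_some (l : List String) (c : String) :
    l.foldl pvXStep (some c) = some (l.foldl max c) := by
  induction l generalizing c with
  | nil => rfl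
  | cons d t ih => simp only [List.foldl_cons, pvXStep]; exact ih _

theorem pv_get_foldS (ps : List (String × String)) (s : PySem.Dict String String) (ind : String) :
    (pvFoldS ps s).get? ind = (pvDates ind ps).foldl pvMStep (s.get? ind) := by
  induction ps generalizing s with
  | nil => rfl
  | cons q rest ih =>
    simp only [pvFoldS, List.foldl_cons, pvDates, List.filter_cons]
    by_cases hq : q.1 = ind
    · have hb : (q.1 == ind) = true := beq_iff_eq.mpr hq
      simp only [hb, reduceIte, List.map_cons, List.foldl_cons]
      have h1 : (s.insert q.1 (pvNewS s q)).get? ind = pvMStep (s.get? ind) q.2 := by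
        have : (s.insert q.1 (pvNewS s q)).get? ind = some (pvNewS s q) := by
          rw [show q.1 = ind from hq, PySem.Dict.get?_insert_self]
        rw [this]
        simp only [pvNewS, pvMStep, hq]
      have := ih (s.insert q.1 (pvNewS s q))
      simp only [pvFoldS, pvDates] at this
      rw [this, h1]
    · have hb : (q.1 == ind) = false := beq_false_of_ne hq
      simp only [hb, Bool.false_eq_true, reduceIte]
      have := ih (s.insert q.1 (pvNewS s q))
      simp only [pvFoldS, pvDates] at this
      rw [this, PySem.Dict.get?_insert_of_ne _ _ (Ne.symm hq)]

theorem pv_get_foldE (ps : List (String × String)) (s : PySem.Dict String String) (ind : String) :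
    (pvFoldE ps s).get? ind = (pvDates ind ps).foldl pvXStep (s.get? ind) := by
  induction ps generalizing s with
  | nil => rfl
  | cons q rest ih =>
    simp only [pvFoldE, List.foldl_cons, pvDates, List.filter_cons]
    by_cases hq : q.1 = ind
    · have hb : (q.1 == ind) = true := beq_iff_eq.mpr hq
      simp only [hb, reduceIte, List.map_cons, List.foldl_cons]
      have h1 : (s.insert q.1 (pvNewE s q)).get? ind = pvXStep (s.get? ind) q.2 := by
        have : (s.insert q.1 (pvNewE s q)).get? ind = some (pvNewE s q) := by
          rw [show q.1 = ind from hq, PySem.Dict.get?_insert_self]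
        rw [this]
        simp only [pvNewE, pvXStep, hq]
      have := ih (s.insert q.1 (pvNewE s q))
      simp only [pvFoldE, pvDates] at this
      rw [this, h1]
    · have hb : (q.1 == ind) = false := beq_false_of_ne hq
      simp only [hb, Bool.false_eq_true, reduceIte]
      have := ih (s.insert q.1 (pvNewE s q))
      simp only [pvFoldE, pvDates] at this
      rw [this, PySem.Dict.get?_insert_of_ne _ _ (Ne.symm hq)]

-- inserting the value already stored changes nothing (unique keys)
theorem pv_insert_get_self (d : PySem.Dict String String) (k c : String)
    (h : d.get? k = some c) (hnd : d.keys.Nodup) : d.insert k c = d := by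
  apply PySem.Dict.ext
  have hc : d.contains k = true := by rw [PySem.Dict.contains_eq_isSome_get?, h]; rfl
  rw [PySem.Dict.items_insert_of_contains _ _ hc]
  have : ∀ p ∈ d.items, (if p.1 == k then (k, c) else p) = id p := by
    intro p hp
    by_cases hpk : p.1 = k
    · have hmem : (k, p.2) ∈ d.items := by rw [← hpk]; exact hp
      have := PySem.Dict.get?_of_mem_items d hmem hnd
      rw [h] at this
      simp only [hpk, beq_self_eq_true, reduceIte, id]
      rw [← hpk, Option.some_inj.mp this]
    · simp [beq_false_of_ne hpk]
  rw [List.map_congr_left this, List.map_id]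

-- one pass of A's innermost body, seen through the per-ticker state
theorem pv_bodyA_step (t date ind : String)
    (sd0 ed0 : PySem.Dict String (PySem.Dict String String))
    (s e : PySem.Dict String String) (hs : s.keys.Nodup) (he : e.keys.Nodup) :
    pvBodyA t date ind (sd0.insert t s, ed0.insert t e)
      = (sd0.insert t (s.insert ind (pvNewS s (ind, date))),
         ed0.insert t (e.insert ind (pvNewE e (ind, date)))) := by
  have hset1 : ∀ (d0 : PySem.Dict String (PySem.Dict String String)) (x : PySem.Dict String String) (v : String),
      pvSet (d0.insert t x) t ind v = d0.insert t (x.insert ind v) := by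
    intro d0 x v
    rw [pvSet, PySem.Dict.getD_insert_self, PySem.Dict.insert_insert_self]
  have comp : ∀ (d0 : PySem.Dict String (PySem.Dict String String)) (x : PySem.Dict String String)
      (hx : x.keys.Nodup) (newv : PySem.Dict String String → String × String → String)
      (cmp : String → String → Prop) [DecidableRel cmp]
      (hnew : ∀ c, x.get? ind = some c → newv x (ind, date) = if cmp date c then date else c)
      (hnone : x.get? ind = none → newv x (ind, date) = date)
      (hirr : ¬ cmp date date),
      (if cmp date (((if x.contains ind = true then d0.insert t x
            else d0.insert t (x.insert ind date)).getD t PySem.Dict.empty).getD ind "")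
        then pvSet (if x.contains ind = true then d0.insert t x
            else d0.insert t (x.insert ind date)) t ind date
        else if x.contains ind = true then d0.insert t x else d0.insert t (x.insert ind date))
        = d0.insert t (x.insert ind (newv x (ind, date))) := by
    intro d0 x hx newv cmp _ hnew hnone hirr
    rcases hgs : x.get? ind with _ | c
    · have hcs : x.contains ind = false := (PySem.Dict.get?_eq_none_iff_contains _ _).mp hgs
      simp only [hcs, Bool.false_eq_true, reduceIte, PySem.Dict.getD_insert_self,
        hset1, hnone hgs]
      rw [if_neg hirr]
    · have hcs : x.contains ind = true := by rw [PySem.Dict.contains_eq_isSome_get?, hgs]; rfl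
      simp only [hcs, reduceIte, PySem.Dict.getD_insert_self, hset1, hnew c hgs]
      rw [PySem.Dict.getD_of_get?_eq_some _ "" hgs]
      by_cases hlt : cmp date c
      · rw [if_pos hlt, if_pos hlt]
      · rw [if_neg hlt, if_neg hlt, pv_insert_get_self x ind c hgs hx]
  simp only [pvBodyA, PySem.Dict.getD_insert_self, hset1, Prod.mk.injEq]
  refine ⟨?_, ?_⟩
  · exact comp sd0 s hs pvNewS (fun a b => a < b)
      (fun c hc => by simp only [pvNewS, hc]; rcases lt_or_ge date c with h | h
                      · rw [if_pos h, min_eq_right (le_of_lt h)]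
                      · rw [if_neg (not_lt.mpr h), min_eq_left h])
      (fun hc => by simp [pvNewS, hc]) (lt_irrefl date)
  · exact comp ed0 e he pvNewE (fun a b => b < a)
      (fun c hc => by simp only [pvNewE, hc]; rcases lt_or_ge c date with h | h
                      · rw [if_pos h, max_eq_right (le_of_lt h)]
                      · rw [if_neg (not_lt.mpr h), max_eq_left h])
      (fun hc => by simp [pvNewE, hc]) (lt_irrefl date)

-- A's whole per-ticker loop, as the pair of flat folds
theorem pv_inner (t : String) (ps : List (String × String))
    (sd0 ed0 : PySem.Dict String (PySem.Dict String String)) :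
    ∀ (s e : PySem.Dict String String), s.keys.Nodup → e.keys.Nodup →
    ps.foldl (fun a q => pvBodyA t q.2 q.1 a) (sd0.insert t s, ed0.insert t e)
      = (sd0.insert t (pvFoldS ps s), ed0.insert t (pvFoldE ps e)) := by
  induction ps with
  | nil => intro s e _ _; rfl
  | cons q rest ih =>
    intro s e hs he
    simp only [List.foldl_cons]
    have hb := pv_bodyA_step t q.2 q.1 sd0 ed0 s e hs he
    rw [hb]
    have := ih (s.insert q.1 (pvNewS s (q.1, q.2))) (e.insert q.1 (pvNewE e (q.1, q.2)))
      (PySem.Dict.nodup_keys_insert _ _ _ hs) (PySem.Dict.nodup_keys_insert _ _ _ he)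
    simpa [pvFoldS, pvFoldE] using this

theorem pv_items_ofList {κ ν : Type} [BEq κ] [LawfulBEq κ] (l : List (κ × ν))
    (h : (l.map Prod.fst).Nodup) : (PySem.Dict.ofList l).items = l := by
  have := PySem.Dict.items_foldl_insert_fresh l Prod.fst Prod.snd PySem.Dict.empty
    (fun a _ => PySem.Dict.contains_empty _) h
  simpa [PySem.Dict.ofList, PySem.Dict.update] using this

-- per-ticker: A's running min dict equals B's collect-then-min dict (and dually for max)
theorem pv_perTicker_S (td : List (String × List (String × Int))) :
    pvFoldS (pvFlat td) PySem.Dict.empty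
      = PySem.Dict.ofList (((pvOcc td).items).map (fun q => (q.1, pvMin q.2))) := by
  have hocc : pvOcc td
      = (pvFlat td).foldl (fun occ q => occ.modify q.1 [] (· ++ [q.2])) PySem.Dict.empty := by
    rw [pvOcc]
    exact pv_flat_fold (σ := PySem.Dict String (List String))
      (fun a i d => a.modify i [] (fun x => x ++ [d])) td PySem.Dict.empty
  have hkS : (pvFoldS (pvFlat td) PySem.Dict.empty).keys
      = PySem.Set.ofList ((pvFlat td).map Prod.fst) := by
    rw [pvFoldS, PySem.Dict.keys_foldl_insert_key (pvFlat td) Prod.fst (fun s q => pvNewS s q),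
      PySem.Dict.keys_empty, PySem.Set.update_nil_left]
  have hnS : (pvFoldS (pvFlat td) PySem.Dict.empty).keys.Nodup := by
    rw [pvFoldS]
    exact PySem.Dict.nodup_keys_foldl_insert_key _ _ _ _ PySem.Dict.nodup_keys_empty
  have hkO : (pvOcc td).keys = PySem.Set.ofList ((pvFlat td).map Prod.fst) := by
    rw [hocc, PySem.Dict.keys_foldl_modify_key (pvFlat td) Prod.fst [] (fun _ q => (· ++ [q.2])),
      PySem.Dict.keys_empty, PySem.Set.update_nil_left]
  have hnO : (pvOcc td).keys.Nodup := by
    rw [hocc]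
    exact PySem.Dict.nodup_keys_foldl_modify_key _ _ _ _ _ PySem.Dict.nodup_keys_empty
  have hgO : ∀ k, (pvOcc td).getD k [] = pvDates k (pvFlat td) := by
    intro k
    rw [hocc, PySem.Dict.getD_foldl_modify_append, PySem.Dict.getD_empty, pvDates,
      List.nil_append]
  have hLfst : (((pvOcc td).items).map (fun q => (q.1, pvMin q.2))).map Prod.fst
      = (pvOcc td).keys := by
    simp [List.map_map, PySem.Dict.keys, Function.comp_def]
  apply PySem.Dict.ext
  rw [pv_items_ofList _ (hLfst ▸ hnO),
    PySem.Dict.items_eq_map_keys _ hnS "", PySem.Dict.items_eq_map_keys (pvOcc td) hnO [],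
    List.map_map, hkS, hkO]
  apply List.map_congr_left
  intro k hk
  simp only [Function.comp_def, Prod.mk.injEq, true_and]
  rw [PySem.Set.mem_ofList] at hk
  have hmem : k ∈ (pvFlat td).map Prod.fst := hk
  have hne : pvDates k (pvFlat td) ≠ [] := by
    obtain ⟨q, hq, hq1⟩ := List.mem_map.mp hmem
    simp only [pvDates, ne_eq, List.map_eq_nil_iff, List.filter_eq_nil_iff]
    intro hall
    exact hall q hq (by simp [hq1])
  rcases hd : pvDates k (pvFlat td) with _ | ⟨d, tl⟩
  · exact absurd hd hne
  · rw [PySem.Dict.getD_eq_get?_getD, pv_get_foldS, PySem.Dict.get?_empty, hd, hgO, hd]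
    have h1 : (d :: tl).foldl pvMStep none = some (tl.foldl min d) := by
      rw [List.foldl_cons, show pvMStep none d = some d from rfl, pv_mfold_some]
    rw [h1, pvMin, PySem.List.min?_id_cons]

theorem pv_perTicker_E (td : List (String × List (String × Int))) :
    pvFoldE (pvFlat td) PySem.Dict.empty
      = PySem.Dict.ofList (((pvOcc td).items).map (fun q => (q.1, pvMax q.2))) := by
  have hocc : pvOcc td
      = (pvFlat td).foldl (fun occ q => occ.modify q.1 [] (· ++ [q.2])) PySem.Dict.empty := by
    rw [pvOcc]
    exact pv_flat_fold (σ := PySem.Dict String (List String))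
      (fun a i d => a.modify i [] (fun x => x ++ [d])) td PySem.Dict.empty
  have hkS : (pvFoldE (pvFlat td) PySem.Dict.empty).keys
      = PySem.Set.ofList ((pvFlat td).map Prod.fst) := by
    rw [pvFoldE, PySem.Dict.keys_foldl_insert_key (pvFlat td) Prod.fst (fun s q => pvNewE s q),
      PySem.Dict.keys_empty, PySem.Set.update_nil_left]
  have hnS : (pvFoldE (pvFlat td) PySem.Dict.empty).keys.Nodup := by
    rw [pvFoldE]
    exact PySem.Dict.nodup_keys_foldl_insert_key _ _ _ _ PySem.Dict.nodup_keys_empty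
  have hkO : (pvOcc td).keys = PySem.Set.ofList ((pvFlat td).map Prod.fst) := by
    rw [hocc, PySem.Dict.keys_foldl_modify_key (pvFlat td) Prod.fst [] (fun _ q => (· ++ [q.2])),
      PySem.Dict.keys_empty, PySem.Set.update_nil_left]
  have hnO : (pvOcc td).keys.Nodup := by
    rw [hocc]
    exact PySem.Dict.nodup_keys_foldl_modify_key _ _ _ _ _ PySem.Dict.nodup_keys_empty
  have hgO : ∀ k, (pvOcc td).getD k [] = pvDates k (pvFlat td) := by
    intro k
    rw [hocc, PySem.Dict.getD_foldl_modify_append, PySem.Dict.getD_empty, pvDates,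
      List.nil_append]
  have hLfst : (((pvOcc td).items).map (fun q => (q.1, pvMax q.2))).map Prod.fst
      = (pvOcc td).keys := by
    simp [List.map_map, PySem.Dict.keys, Function.comp_def]
  apply PySem.Dict.ext
  rw [pv_items_ofList _ (hLfst ▸ hnO),
    PySem.Dict.items_eq_map_keys _ hnS "", PySem.Dict.items_eq_map_keys (pvOcc td) hnO [],
    List.map_map, hkS, hkO]
  apply List.map_congr_left
  intro k hk
  simp only [Function.comp_def, Prod.mk.injEq, true_and]
  rw [PySem.Set.mem_ofList] at hk
  have hmem : k ∈ (pvFlat td).map Prod.fst := hk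
  have hne : pvDates k (pvFlat td) ≠ [] := by
    obtain ⟨q, hq, hq1⟩ := List.mem_map.mp hmem
    simp only [pvDates, ne_eq, List.map_eq_nil_iff, List.filter_eq_nil_iff]
    intro hall
    exact hall q hq (by simp [hq1])
  rcases hd : pvDates k (pvFlat td) with _ | ⟨d, tl⟩
  · exact absurd hd hne
  · rw [PySem.Dict.getD_eq_get?_getD, pv_get_foldE, PySem.Dict.get?_empty, hd, hgO, hd]
    have h1 : (d :: tl).foldl pvXStep none = some (tl.foldl max d) := by
      rw [List.foldl_cons, show pvXStep none d = some d from rfl, pv_xfold_some]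
    rw [h1, pvMax, PySem.List.max?_id_cons]

theorem pv_outerA (items : List (String × List (String × List (String × Int))))
    (sd ed : PySem.Dict String (PySem.Dict String String))
    (hnd : (items.map Prod.fst).Nodup)
    (hs : ∀ t ∈ items.map Prod.fst, sd.contains t = false)
    (he : ∀ t ∈ items.map Prod.fst, ed.contains t = false) :
    (items.foldl (fun st p => pvStepA st p.1 p.2) (sd, ed)).1.items
        = sd.items ++ items.map (fun p => (p.1, pvFoldS (pvFlat p.2) PySem.Dict.empty))
    ∧ (items.foldl (fun st p => pvStepA st p.1 p.2) (sd, ed)).2.items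
        = ed.items ++ items.map (fun p => (p.1, pvFoldE (pvFlat p.2) PySem.Dict.empty)) := by
  induction items generalizing sd ed with
  | nil => simp
  | cons p rest ih =>
    have hsp : sd.contains p.1 = false := hs p.1 (by simp)
    have hep : ed.contains p.1 = false := he p.1 (by simp)
    have hnd2 : p.1 ∉ rest.map Prod.fst ∧ (rest.map Prod.fst).Nodup := by
      rw [List.map_cons, List.nodup_cons] at hnd; exact hnd
    have hp1 : p.1 ∉ rest.map Prod.fst := hnd2.1
    simp only [List.foldl_cons]
    have hstep : pvStepA (sd, ed) p.1 p.2
        = (sd.insert p.1 (pvFoldS (pvFlat p.2) PySem.Dict.empty),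
           ed.insert p.1 (pvFoldE (pvFlat p.2) PySem.Dict.empty)) := by
      rw [pvStepA]
      simp only [hsp, hep, Bool.false_eq_true, reduceIte]
      rw [pv_flat_fold (fun a i d => pvBodyA p.1 d i a)]
      exact pv_inner p.1 (pvFlat p.2) sd ed PySem.Dict.empty PySem.Dict.empty
        PySem.Dict.nodup_keys_empty PySem.Dict.nodup_keys_empty
    rw [hstep]
    have hfresh : ∀ x (v : PySem.Dict String String)
        (hxv : ∀ t ∈ rest.map Prod.fst, x.contains t = false) (t : String)
        (ht : t ∈ rest.map Prod.fst), (PySem.Dict.insert x p.1 v).contains t = false := by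
      intro x v hxv t ht
      rw [PySem.Dict.contains_insert]
      have : t ≠ p.1 := fun hh => hp1 (hh ▸ ht)
      simp [beq_false_of_ne this, hxv t ht]
    obtain ⟨ih1, ih2⟩ := ih (sd.insert p.1 (pvFoldS (pvFlat p.2) PySem.Dict.empty))
      (ed.insert p.1 (pvFoldE (pvFlat p.2) PySem.Dict.empty))
      hnd2.2
      (hfresh _ _ (fun t ht => hs t (by simp [ht])))
      (hfresh _ _ (fun t ht => he t (by simp [ht])))
    constructor
    · rw [ih1, PySem.Dict.items_insert_of_not_contains _ _ hsp]
      simp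
    · rw [ih2, PySem.Dict.items_insert_of_not_contains _ _ hep]
      simp

theorem pv_outerB (items : List (String × List (String × List (String × Int))))
    (sd ed : PySem.Dict String (PySem.Dict String String))
    (hnd : (items.map Prod.fst).Nodup)
    (hs : ∀ t ∈ items.map Prod.fst, sd.contains t = false)
    (he : ∀ t ∈ items.map Prod.fst, ed.contains t = false) :
    (items.foldl (fun st p =>
        (st.1.insert p.1 (PySem.Dict.ofList (((pvOcc p.2).items).map (fun q => (q.1, pvMin q.2)))),
         st.2.insert p.1 (PySem.Dict.ofList (((pvOcc p.2).items).map (fun q => (q.1, pvMax q.2))))))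
      (sd, ed)).1.items
        = sd.items ++ items.map (fun p => (p.1, PySem.Dict.ofList (((pvOcc p.2).items).map (fun q => (q.1, pvMin q.2)))))
    ∧ (items.foldl (fun st p =>
        (st.1.insert p.1 (PySem.Dict.ofList (((pvOcc p.2).items).map (fun q => (q.1, pvMin q.2)))),
         st.2.insert p.1 (PySem.Dict.ofList (((pvOcc p.2).items).map (fun q => (q.1, pvMax q.2))))))
      (sd, ed)).2.items
        = ed.items ++ items.map (fun p => (p.1, PySem.Dict.ofList (((pvOcc p.2).items).map (fun q => (q.1, pvMax q.2))))) := by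
  induction items generalizing sd ed with
  | nil => simp
  | cons p rest ih =>
    have hsp : sd.contains p.1 = false := hs p.1 (by simp)
    have hep : ed.contains p.1 = false := he p.1 (by simp)
    have hnd2 : p.1 ∉ rest.map Prod.fst ∧ (rest.map Prod.fst).Nodup := by
      rw [List.map_cons, List.nodup_cons] at hnd; exact hnd
    have hp1 : p.1 ∉ rest.map Prod.fst := hnd2.1
    simp only [List.foldl_cons]
    have hfresh : ∀ (x : PySem.Dict String (PySem.Dict String String)) (v : PySem.Dict String String)
        (hxv : ∀ t ∈ rest.map Prod.fst, x.contains t = false) (t : String)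
        (ht : t ∈ rest.map Prod.fst), (PySem.Dict.insert x p.1 v).contains t = false := by
      intro x v hxv t ht
      rw [PySem.Dict.contains_insert]
      have : t ≠ p.1 := fun hh => hp1 (hh ▸ ht)
      simp [beq_false_of_ne this, hxv t ht]
    obtain ⟨ih1, ih2⟩ := ih
      (sd.insert p.1 (PySem.Dict.ofList (((pvOcc p.2).items).map (fun q => (q.1, pvMin q.2)))))
      (ed.insert p.1 (PySem.Dict.ofList (((pvOcc p.2).items).map (fun q => (q.1, pvMax q.2)))))
      hnd2.2
      (hfresh _ _ (fun t ht => hs t (by simp [ht])))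
      (hfresh _ _ (fun t ht => he t (by simp [ht])))
    constructor
    · rw [ih1, PySem.Dict.items_insert_of_not_contains _ _ hsp]
      simp
    · rw [ih2, PySem.Dict.items_insert_of_not_contains _ _ hep]
      simp

-- ===== VERDICT (by name: the statement is the Claim_ definition above) =====
theorem get_start_and_end_date_spec : Claim_equal_get_start_and_end_date := by
  intro items _ hpre
  unfold Spec_get_start_and_end_date
  obtain ⟨ha1, ha2⟩ := pv_outerA items PySem.Dict.empty PySem.Dict.empty hpre
    (fun _ _ => PySem.Dict.contains_empty _) (fun _ _ => PySem.Dict.contains_empty _)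
  obtain ⟨hb1, hb2⟩ := pv_outerB items PySem.Dict.empty PySem.Dict.empty hpre
    (fun _ _ => PySem.Dict.contains_empty _) (fun _ _ => PySem.Dict.contains_empty _)
  simp only [get_start_and_end_date, get_start_and_end_date_alt]
  rw [ha1, ha2, hb1, hb2]
  simp only [pv_perTicker_S, pv_perTicker_E]
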